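-- pv_equiv track=rewrite | github.com/anasmohamed05221/MARIE-Studio | assembler.py | pass1
-- ===== SOURCE A (Python) =====
-- def pass1(lines):
--     """
--     Scan through lines and record the address of every label.
--     Returns a dictionary: { "LABEL_NAME": address }
--     """
--     symbol_table = {}
--     address = 0
--     line_no = 0
--
--     for line in lines:
--         # Remove comments and strip whitespace
--         line = line.split("/")[0].strip()
--
--         # Skip empty lines
--         if not line:
--             line_no+=1
--             continue
--
--         # Check if line has a label (e.g. "LOOP, LOAD X")
--         if "," in line:
--             label = line.split(",")[0].strip().upper()
--             if label in symbol_table: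
--                 raise ValueError(f"Line {line_no+1}: Duplicate label '{label}'")
--             symbol_table[label] = address
--
--         address += 1
--         line_no+=1
--
--     return symbol_table
-- ===== SOURCE B (Python) =====
-- def pass1(lines):
--     """
--     Scan through lines and record the address of every label.
--     Returns a dictionary: { "LABEL_NAME": address }
--     """
--     # Stage 1: comment-strip and whitespace-trim every line.
--     cleaned = [raw.split("/")[0].strip() for raw in lines]
--     # Stage 2: prefix-sum table of non-blank counts; addrs[i] is the address
--     # of line i (the number of non-blank cleaned lines before it).
--     addrs = [0]
--     for line in cleaned:
--         addrs.append(addrs[-1] + (1 if line else 0))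
--     # Stage 3: candidate triples (label, address, original line index).
--     cands = [(line.split(",")[0].strip().upper(), addrs[i], i)
--              for i, line in enumerate(cleaned) if line and "," in line]
--     # Stage 4: duplicate detection as its own scan over the label sequence.
--     seen = set()
--     for label, _, i in cands:
--         if label in seen:
--             raise ValueError(f"Line {i+1}: Duplicate label '{label}'")
--         seen.add(label)
--     # Stage 5: the table is built wholesale from the candidates.
--     return {label: addr for label, addr, _ in cands}
-- ===== Notes on version B (the rewrite author's own statement) =====
-- stated objective: alternative
-- what changed: Replaces A's single fused loop with two hand-maintained counters by staged passes: a prefix-sum address table over the cleaned lines, a candidate-triple list, a separate duplicate scan over the label sequence, and a wholesale dict-comprehension build of the table.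
import Mathlib
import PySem

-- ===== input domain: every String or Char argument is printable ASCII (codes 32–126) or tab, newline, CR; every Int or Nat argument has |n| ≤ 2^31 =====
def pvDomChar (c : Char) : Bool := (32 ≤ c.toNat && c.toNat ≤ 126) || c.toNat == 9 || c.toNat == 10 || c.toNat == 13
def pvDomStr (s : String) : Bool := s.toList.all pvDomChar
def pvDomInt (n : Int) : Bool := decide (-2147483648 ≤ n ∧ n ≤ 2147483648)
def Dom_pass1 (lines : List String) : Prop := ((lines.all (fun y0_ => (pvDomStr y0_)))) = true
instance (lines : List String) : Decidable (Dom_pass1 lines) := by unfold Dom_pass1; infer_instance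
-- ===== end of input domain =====

-- B replaces A's fused loop with two hand-maintained counters by staged passes: a prefix-sum
-- address table, a candidate-triple list, a separate duplicate scan, and a wholesale table build
-- (alternative decomposition, same cost). Pre_ excludes the duplicate-label inputs, where the Python raises ValueError.

-- ===== PORT A =====
-- line.split("/")[0].strip()
def pvClean (s : String) : String := PySem.Str.strip ((((PySem.Str.split? s "/").getD [])).headD "")
-- line.split(",")[0].strip().upper()
def pvLabel (s : String) : String := PySem.Str.upper (PySem.Str.strip ((((PySem.Str.split? s ",").getD [])).headD ""))

-- A's loop over lines with state (symbol_table, address, line_no); none = the ValueError path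
def pass1Go : List String → PySem.Dict String Int → Int → Int → Option (PySem.Dict String Int)
  | [], tbl, _, _ => some tbl
  | raw :: rest, tbl, addr, lineNo =>
    let line := pvClean raw
    if line = "" then pass1Go rest tbl addr (lineNo + 1)
    else if PySem.Str.isIn "," line then
      let lbl := pvLabel line
      if tbl.contains lbl then none
      else pass1Go rest (tbl.insert lbl addr) (addr + 1) (lineNo + 1)
    else pass1Go rest tbl (addr + 1) (lineNo + 1)

def pass1 (lines : List String) : List (String × Int) :=
  ((pass1Go lines PySem.Dict.empty 0 0).getD PySem.Dict.empty).items

-- ===== PORT B =====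
-- Stage 2 loop: addrs.append(addrs[-1] + (1 if line else 0))
def pvAddrs (cleaned : List String) : List Int :=
  cleaned.foldl (fun a line => a ++ [PySem.List.pyGetD a (-1) 0 + (if line ≠ "" then 1 else 0)]) [0]

-- Stage 4 loop: the duplicate scan over the candidate labels (false = the ValueError path)
def pvNoDups : List (String × Int × Int) → PySem.Set String → Bool
  | [], _ => true
  | (lbl, _, _) :: rest, seen =>
    if PySem.Set.contains seen lbl then false
    else pvNoDups rest (PySem.Set.add seen lbl)

def pass1_alt (lines : List String) : List (String × Int) :=
  let cleaned := lines.map pvClean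
  let addrs := pvAddrs cleaned
  let cands := ((PySem.List.enumerate cleaned 0).filter
      (fun p => (p.2 != "") && PySem.Str.isIn "," p.2)).map
      (fun p => (pvLabel p.2, PySem.List.pyGetD addrs p.1 0, p.1))
  if pvNoDups cands PySem.Set.empty then
    (cands.foldl (fun d t => d.insert t.1 t.2.1) PySem.Dict.empty).items
  else []

-- ===== PRECONDITION & SPEC =====
-- Pre_ excludes exactly the inputs on which the Python raises ValueError: a duplicate label
-- among the non-blank comment-stripped lines that contain a comma.
def Pre_pass1 (lines : List String) : Prop :=
  ((((lines.map pvClean).filter (· ≠ "")).filter (fun l => PySem.Str.isIn "," l)).map pvLabel).Nodup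
instance (lines : List String) : Decidable (Pre_pass1 lines) := by unfold Pre_pass1; infer_instance

def pvWitness_pass1 : List String :=
  ["START, LOAD X", "ADD Y / comment", "   ", "END, HALT"]

def Spec_pass1 (lines : List String) (out : List (String × Int)) : Prop := out = pass1_alt lines
instance (lines : List String) (out : List (String × Int)) : Decidable (Spec_pass1 lines out) := by
  unfold Spec_pass1; infer_instance

-- ===== CLAIM (what is proved, stated in full; the proofs are below) =====
def Claim_equal_pass1 : Prop :=
  ∀ (lines : List String), Dom_pass1 lines → Pre_pass1 lines → Spec_pass1 lines (pass1 lines)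

-- ===== LEMMAS AND PROOFS =====

-- Reference shape shared by the two proofs: the (label, address) pairs of the cleaned lines.
def pairsC : List String → Int → List (String × Int)
  | [], _ => []
  | c :: cs, a =>
    if c = "" then pairsC cs a
    else if PySem.Str.isIn "," c then (pvLabel c, a) :: pairsC cs (a + 1)
    else pairsC cs (a + 1)

theorem pairsC_map_fst (cs : List String) (a : Int) :
    (pairsC cs a).map Prod.fst =
      ((cs.filter (· ≠ "")).filter (fun l => PySem.Str.isIn "," l)).map pvLabel := by
  induction cs generalizing a with
  | nil => simp [pairsC]
  | cons c cs ih =>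
    by_cases h : c = ""
    · simp [pairsC, h, ih]
    · by_cases hc : PySem.Chars.isIn [','] c.toList = true
      · simp [pairsC, h, hc, PySem.Str.isIn, ih]
      · simp only [Bool.not_eq_true] at hc
        simp [pairsC, h, hc, PySem.Str.isIn, ih]

-- A's loop, under fresh distinct labels, folds exactly the pairsC pairs into the table.
theorem pass1Go_eq (lines : List String) :
    ∀ (tbl : PySem.Dict String Int) (addr k : Int),
    ((pairsC (lines.map pvClean) addr).map Prod.fst).Nodup →
    (∀ l ∈ (pairsC (lines.map pvClean) addr).map Prod.fst, tbl.contains l = false) →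
    pass1Go lines tbl addr k =
      some ((pairsC (lines.map pvClean) addr).foldl (fun t p => t.insert p.1 p.2) tbl) := by
  induction lines with
  | nil => intro tbl addr k _ _; simp [pass1Go, pairsC]
  | cons raw rest ih =>
    intro tbl addr k hnd hfr
    simp only [List.map_cons] at hnd hfr ⊢
    by_cases h : pvClean raw = ""
    · simp only [pairsC, if_pos h] at hnd hfr
      simp only [pass1Go, if_pos h, pairsC, h, if_true]
      exact ih tbl addr (k + 1) hnd hfr
    · by_cases hc : PySem.Str.isIn "," (pvClean raw) = true
      · simp only [pairsC, if_neg h, hc, if_true, List.map_cons, List.nodup_cons,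
          List.mem_cons] at hnd hfr
        obtain ⟨hn1, hnd'⟩ := hnd
        have hfr0 : tbl.contains (pvLabel (pvClean raw)) = false := hfr _ (Or.inl rfl)
        simp only [pass1Go, if_neg h, hc, if_true, hfr0, Bool.false_eq_true, if_false,
          pairsC, List.foldl_cons]
        refine ih _ (addr + 1) (k + 1) hnd' ?_
        intro l hl
        rw [PySem.Dict.contains_insert]
        have : l ≠ pvLabel (pvClean raw) := fun he => hn1 (he ▸ hl)
        simp [this, hfr _ (Or.inr hl)]
      · simp only [Bool.not_eq_true] at hc
        simp only [pairsC, if_neg h, hc, Bool.false_eq_true, if_false] at hnd hfr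
        simp only [pass1Go, if_neg h, hc, Bool.false_eq_true, if_false, pairsC]
        exact ih tbl (addr + 1) (k + 1) hnd hfr

-- pvAddrs is the scan of the running non-blank count.
def pvScan (a : Int) : List String → List Int
  | [] => []
  | c :: cs => (a + (if c ≠ "" then 1 else 0)) :: pvScan (a + (if c ≠ "" then 1 else 0)) cs

-- addrs[-1] reads the last element of the (always non-empty) prefix table
theorem pvGetD_neg_one (xs : List Int) (a : Int) (h : xs.getLast? = some a) :
    PySem.List.pyGetD xs (-1) 0 = a := by
  simp only [PySem.List.pyGetD, PySem.List.pyGet?, PySem.List.pyIdx?, Int.reduceNeg,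
    Int.neg_nonneg, Int.reduceLE, ↓reduceIte, neg_le_neg_iff, Nat.one_le_cast, neg_neg,
    Int.toNat_one]
  have hlen : 1 ≤ xs.length := by cases xs <;> simp_all
  rw [if_pos hlen]
  simp only [Option.bind_some]
  rw [List.getLast?_eq_getElem?] at h
  simp [h]

theorem pvAddrs_fold (cs : List String) :
    ∀ (init : List Int) (a : Int), init.getLast? = some a →
    cs.foldl (fun l line => l ++ [PySem.List.pyGetD l (-1) 0 + (if line ≠ "" then 1 else 0)]) init
      = init ++ pvScan a cs := by
  induction cs with
  | nil => intro init a _; simp [pvScan]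
  | cons c cs ih =>
    intro init a h
    simp only [List.foldl_cons]
    rw [pvGetD_neg_one init a h,
      ih (init ++ [a + (if c ≠ "" then 1 else 0)]) (a + (if c ≠ "" then 1 else 0)) (by simp)]
    simp [pvScan]

theorem pvAddrs_eq (cs : List String) : pvAddrs cs = 0 :: pvScan 0 cs := by
  unfold pvAddrs
  rw [pvAddrs_fold cs [0] 0 rfl]
  simp

-- B's filtered enumerate with prefix-table lookups projects onto pairsC (generalized over
-- the start index and the running address).
theorem cands_go (cs : List String) :
    ∀ (addrs : List Int) (k : Nat) (a : Int),
    (∀ j : Nat, j < cs.length →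
        PySem.List.pyGetD addrs (((k + j : Nat) : Int)) 0 = (a :: pvScan a cs).getD j 0) →
    (((PySem.List.enumerate cs (k : Int)).filter
        (fun p => (p.2 != "") && PySem.Str.isIn "," p.2)).map
        (fun p => (pvLabel p.2, PySem.List.pyGetD addrs p.1 0, p.1))).map
      (fun t => (t.1, t.2.1)) = pairsC cs a := by
  induction cs with
  | nil => intro addrs k a _; simp [PySem.List.enumerate_nil, pairsC]
  | cons c cs ih =>
    intro addrs k a H
    have h0 : PySem.List.pyGetD addrs (k : Int) 0 = a := by
      have := H 0 (by simp)
      simpa using this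
    have H' : ∀ j : Nat, j < cs.length →
        PySem.List.pyGetD addrs (((k + 1 + j : Nat) : Int)) 0
          = ((a + (if c ≠ "" then 1 else 0)) :: pvScan (a + (if c ≠ "" then 1 else 0)) cs).getD j 0 := by
      intro j hj
      have := H (j + 1) (by simpa using Nat.succ_lt_succ hj)
      rw [show k + (j + 1) = k + 1 + j by omega] at this
      simpa [pvScan] using this
    have ihr := ih addrs (k + 1) (a + (if c ≠ "" then 1 else 0)) H'
    simp only [PySem.List.enumerate_cons, List.filter_cons,
      show ((k : Int) + 1) = ((k + 1 : Nat) : Int) by push_cast; ring]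
    by_cases h : c = ""
    · rw [if_neg (by simp [h])]
      simp only [h, ne_eq, not_true_eq_false, if_false, add_zero] at ihr
      simpa [pairsC, h] using ihr
    · simp only [h, ne_eq, not_false_iff, if_true] at ihr
      by_cases hc : PySem.Chars.isIn [','] c.toList = true
      · rw [if_pos (by simp [h, hc, PySem.Str.isIn])]
        simp only [List.map_cons, h0, pairsC, if_neg h]
        rw [if_pos (show PySem.Str.isIn "," c = true by simp [PySem.Str.isIn, hc])]
        exact congrArg _ ihr
      · simp only [Bool.not_eq_true] at hc
        rw [if_neg (by simp [hc, PySem.Str.isIn])]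
        simp only [pairsC, if_neg h]
        rw [if_neg (show ¬ PySem.Str.isIn "," c = true by simp [PySem.Str.isIn, hc])]
        exact ihr

-- B's candidate list projects onto pairsC.
theorem cands_eq (lines : List String) :
    (((PySem.List.enumerate (lines.map pvClean) 0).filter
        (fun p => (p.2 != "") && PySem.Str.isIn "," p.2)).map
        (fun p => (pvLabel p.2, PySem.List.pyGetD (pvAddrs (lines.map pvClean)) p.1 0, p.1))).map
      (fun t => (t.1, t.2.1)) = pairsC (lines.map pvClean) 0 := by
  rw [show ((0 : Int)) = ((0 : Nat) : Int) by simp]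
  refine cands_go (lines.map pvClean) _ 0 0 ?_
  intro j hj
  rw [pvAddrs_eq, PySem.List.pyGetD_natCast, Nat.zero_add]

theorem pvNoDups_of_nodup (cands : List (String × Int × Int)) (seen : PySem.Set String) :
    ((cands.map Prod.fst).Nodup) →
    (∀ l ∈ cands.map Prod.fst, PySem.Set.contains seen l = false) →
    pvNoDups cands seen = true := by
  induction cands generalizing seen with
  | nil => intro _ _; rfl
  | cons t rest ih =>
    intro hnd hfr
    obtain ⟨lbl, ad, i⟩ := t
    simp only [List.map_cons, List.nodup_cons, List.mem_cons] at hnd hfr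
    have h0 : PySem.Set.contains seen lbl = false := hfr _ (Or.inl rfl)
    simp only [pvNoDups, h0, Bool.false_eq_true, if_false]
    refine ih _ hnd.2 ?_
    intro l hl
    have hne : l ≠ lbl := fun he => hnd.1 (he ▸ hl)
    have : l ∉ PySem.Set.add seen lbl := by
      rw [PySem.Set.mem_add]
      rintro (hmem | rfl)
      · simp only [← PySem.Set.contains_iff, hfr _ (Or.inr hl)] at hmem
        exact absurd hmem (by simp)
      · exact hne rfl
    simp only [← Bool.not_eq_true, PySem.Set.contains_iff]
    exact this

-- ===== VERDICT (by name: the statement is the Claim_ definition above) =====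
theorem pass1_spec : Claim_equal_pass1 := by
  intro lines _ hpre
  unfold Spec_pass1 pass1 pass1_alt
  have hnd : ((pairsC (lines.map pvClean) 0).map Prod.fst).Nodup := by
    rw [pairsC_map_fst]; exact hpre
  have hc' := cands_eq lines
  set cands := ((PySem.List.enumerate (lines.map pvClean) 0).filter
      (fun p => (p.2 != "") && PySem.Str.isIn "," p.2)).map
      (fun p => (pvLabel p.2, PySem.List.pyGetD (pvAddrs (lines.map pvClean)) p.1 0, p.1))
      with hcands
  have hfold : cands.foldl (fun d t => d.insert t.1 t.2.1) PySem.Dict.empty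
      = (pairsC (lines.map pvClean) 0).foldl (fun t p => t.insert p.1 p.2) PySem.Dict.empty := by
    calc cands.foldl (fun d t => d.insert t.1 t.2.1) PySem.Dict.empty
        = (cands.map (fun t : String × Int × Int => (t.1, t.2.1))).foldl
            (fun t p => t.insert p.1 p.2) PySem.Dict.empty := by
          rw [hcands]; simp only [List.foldl_map]
      _ = _ := by rw [hc']
  have hlbl : (cands.map Prod.fst).Nodup := by
    have hm : cands.map Prod.fst
        = (cands.map (fun t : String × Int × Int => (t.1, t.2.1))).map Prod.fst := by
      simp [List.map_map]
    rw [hm, hc']; exact hnd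
  have hnod : pvNoDups cands PySem.Set.empty = true :=
    pvNoDups_of_nodup cands _ hlbl (fun l _ => by simp [PySem.Set.contains, PySem.Set.empty])
  rw [pass1Go_eq lines PySem.Dict.empty 0 0 hnd (fun l _ => PySem.Dict.contains_empty l),
    if_pos hnod, hfold]
  rfl
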